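-- pv_equiv track=rewrite | github.com/ratamranjith/DataStructures | AlgorithmicProblems/randomNameGenerate.py | generate_random_algo
-- ===== SOURCE A (Python) =====
-- import string
--
-- def random_character(characterValue):
--
--     a = 65879
--     c = 56465431307098098
--     m = 2**32
--     characters = (a * characterValue + c) % m
--     return characters
--
-- def generate_random_algo(length=9):
--     characters = string.ascii_letters + string.digits + string.punctuation
--     characterValue = 12568
--     random_string = ""
--     for _ in range(length):
--         characterValue = random_character(characterValue)
--         index = characterValue % len(characters)
--         random_string += characters[index]
--     return random_string
-- ===== SOURCE B (Python) =====
-- import string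
--
-- def generate_random_algo(length=9):
--     # Closed-form LCG: the i-th state is computed directly as
--     # a^i * seed + c * (a^i - 1)/(a - 1)  (mod 2**32), via modular exponentiation.
--     characters = string.ascii_letters + string.digits + string.punctuation
--     a = 65879
--     c = 56465431307098098
--     m = 2 ** 32
--     M = m * (a - 1)
--
--     def state(n):
--         an = pow(a, n, M)
--         return (an * 12568 + c * ((an - 1) // (a - 1))) % m
--
--     return "".join(characters[state(i + 1) % len(characters)] for i in range(length))
-- ===== Notes on version B (the rewrite author's own statement) =====
-- stated objective: alternative
-- what changed: Replaces A's single stateful LCG loop with a per-index closed form s_n = a^n*seed + c*(a^n-1)/(a-1) mod m computed by three-argument pow (modular exponentiation), mapped over the range and joined.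
import Mathlib
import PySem

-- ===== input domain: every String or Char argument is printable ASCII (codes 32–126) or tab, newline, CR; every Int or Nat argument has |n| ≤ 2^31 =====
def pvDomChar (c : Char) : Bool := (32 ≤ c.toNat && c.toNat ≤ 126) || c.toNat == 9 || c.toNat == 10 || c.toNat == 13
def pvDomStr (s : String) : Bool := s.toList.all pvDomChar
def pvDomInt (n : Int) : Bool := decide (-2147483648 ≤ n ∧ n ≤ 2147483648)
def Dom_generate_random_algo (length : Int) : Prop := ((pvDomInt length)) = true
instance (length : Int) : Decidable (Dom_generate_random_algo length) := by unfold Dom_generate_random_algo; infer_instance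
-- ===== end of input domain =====

-- B replaces A's stateful loop by a per-index closed form of the LCG
-- (modular exponentiation) mapped over the range and joined (objective: alternative).

-- ===== PORT A =====
def random_character (characterValue : Int) : Int :=
  let a : Int := 65879
  let c : Int := 56465431307098098
  let m : Int := 2 ^ 32
  PySem.Int.mod (a * characterValue + c) m

def generate_random_algo (length : Int) : String :=
  let characters : String := "abcdefghijklmnopqrstuvwxyzABCDEFGHIJKLMNOPQRSTUVWXYZ0123456789!\"#$%&'()*+,-./:;<=>?@[\\]^_`{|}~"
  let r := (PySem.List.pyRange 0 length 1).foldl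
    (fun (st : Int × List Char) _ =>
      let characterValue := random_character st.1
      let index := PySem.Int.mod characterValue (PySem.Str.len characters)
      -- characters[index] is always in range here; .getD is a totality cast
      (characterValue, st.2 ++ [(PySem.Str.pyGet? characters index).getD ' ']))
    ((12568 : Int), ([] : List Char))
  String.ofList r.2

-- ===== PORT B =====
-- pow(a, n, M) for n ≥ 0, then the closed-form state (Python's local `state`)
def pvStateB (n : Int) : Int :=
  let a : Int := 65879
  let c : Int := 56465431307098098
  let m : Int := 2 ^ 32
  let M : Int := m * (a - 1)
  let an : Int := PySem.Int.mod (a ^ n.toNat) M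
  PySem.Int.mod (an * 12568 + c * PySem.Int.floordiv (an - 1) (a - 1)) m

def generate_random_algo_alt (length : Int) : String :=
  let characters : String := "abcdefghijklmnopqrstuvwxyzABCDEFGHIJKLMNOPQRSTUVWXYZ0123456789!\"#$%&'()*+,-./:;<=>?@[\\]^_`{|}~"
  String.ofList (PySem.Chars.join []
    ((PySem.List.pyRange 0 length 1).map
      (fun i => [(PySem.Str.pyGet? characters
                    (PySem.Int.mod (pvStateB (i + 1)) (PySem.Str.len characters))).getD ' '])))

-- ===== PRECONDITION & SPEC =====
def Spec_generate_random_algo (length : Int) (out : String) : Prop := out = generate_random_algo_alt length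
instance (length : Int) (out : String) : Decidable (Spec_generate_random_algo length out) := by unfold Spec_generate_random_algo; infer_instance

-- ===== CLAIM (what is proved, stated in full; the proofs are below) =====
def Claim_equal_generate_random_algo : Prop := ∀ (length : Int), Dom_generate_random_algo length → Spec_generate_random_algo length (generate_random_algo length)

-- ===== LEMMAS AND PROOFS =====

-- A's loop state as a Nat recursion
def pvIter : Nat → Int
  | 0 => 12568
  | n + 1 => random_character (pvIter n)

-- the character picked from a state value (shared subexpression of both ports)
def pvCh (cv : Int) : Char :=
  (PySem.Str.pyGet? "abcdefghijklmnopqrstuvwxyzABCDEFGHIJKLMNOPQRSTUVWXYZ0123456789!\"#$%&'()*+,-./:;<=>?@[\\]^_`{|}~"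
    (PySem.Int.mod cv (PySem.Str.len "abcdefghijklmnopqrstuvwxyzABCDEFGHIJKLMNOPQRSTUVWXYZ0123456789!\"#$%&'()*+,-./:;<=>?@[\\]^_`{|}~"))).getD ' '

def pvGeom (n : Nat) : Int := ∑ i ∈ Finset.range n, (65879 : Int) ^ i

lemma pvIter_closed (n : Nat) :
    pvIter n = ((65879 : Int) ^ n * 12568 + 56465431307098098 * pvGeom n) % 2 ^ 32 := by
  induction n with
  | zero => simp [pvIter, pvGeom]
  | succ n ih =>
    have hm : (0 : Int) < 2 ^ 32 := by norm_num
    rw [pvIter, random_character, PySem.Int.mod_eq_emod_of_pos hm, ih]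
    set X : Int := (65879 : Int) ^ n * 12568 + 56465431307098098 * pvGeom n with hX
    have h1 : (65879 * (X % 2 ^ 32) + 56465431307098098) % 2 ^ 32
        = (65879 * X + 56465431307098098) % 2 ^ 32 := by
      conv_lhs => rw [Int.add_emod, Int.mul_emod, Int.emod_emod_of_dvd _ dvd_rfl, ← Int.mul_emod, ← Int.add_emod]
    rw [h1]
    have h2 : (65879 : Int) * X + 56465431307098098
        = 65879 ^ (n + 1) * 12568 + 56465431307098098 * pvGeom (n + 1) := by
      rw [hX, pvGeom, pvGeom, geom_sum_succ]
      ring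
    rw [h2]

lemma pvStateB_closed (k : Nat) :
    pvStateB (k : Int) = ((65879 : Int) ^ k * 12568 + 56465431307098098 * pvGeom k) % 2 ^ 32 := by
  have hm : (0 : Int) < 2 ^ 32 := by norm_num
  have hM : (0 : Int) < 2 ^ 32 * (65879 - 1) := by norm_num
  rw [pvStateB]
  simp only [Int.toNat_natCast]
  rw [PySem.Int.mod_eq_emod_of_pos hM, PySem.Int.mod_eq_emod_of_pos hm]
  set q : Int := (65879 : Int) ^ k / (2 ^ 32 * (65879 - 1)) with hq
  have han : (65879 : Int) ^ k % (2 ^ 32 * (65879 - 1))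
      = 65879 ^ k - 2 ^ 32 * (65879 - 1) * q := by
    rw [hq]; omega
  have hgeom : ((65879 : Int) - 1) * pvGeom k = 65879 ^ k - 1 := by
    have := geom_sum_mul (65879 : Int) k
    rw [pvGeom]; linarith [this]
  have hsub : (65879 : Int) ^ k % (2 ^ 32 * (65879 - 1)) - 1
      = (65879 - 1) * (pvGeom k - 2 ^ 32 * q) := by
    rw [han]; linarith [hgeom]
  rw [hsub, PySem.Int.floordiv_eq_ediv_of_pos (by norm_num : (0:Int) < 65879 - 1),
      Int.mul_ediv_cancel_left _ (by norm_num : (65879 : Int) - 1 ≠ 0), han]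
  have h3 : ((65879:Int) ^ k - 2 ^ 32 * (65879 - 1) * q) * 12568
       + 56465431307098098 * (pvGeom k - 2 ^ 32 * q)
      = ((65879:Int) ^ k * 12568 + 56465431307098098 * pvGeom k)
        + 2 ^ 32 * (-((65879 - 1) * q * 12568 + 56465431307098098 * q)) := by ring
  rw [h3, Int.add_mul_emod_self_left]

lemma pvState_eq_iter (k : Nat) : pvStateB (k : Int) = pvIter k := by
  rw [pvStateB_closed, pvIter_closed]

-- A's fold over List.range, fully characterised
lemma pvFoldA (n : Nat) :
    (List.range n).foldl
      (fun (st : Int × List Char) (_ : Nat) =>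
        (random_character st.1, st.2 ++ [pvCh (random_character st.1)]))
      ((12568 : Int), ([] : List Char))
    = (pvIter n, (List.range n).map (fun k => pvCh (pvIter (k + 1)))) := by
  induction n with
  | zero => simp [pvIter]
  | succ n ih =>
    rw [List.range_succ, List.foldl_append, ih, List.map_append]
    simp [pvIter]

theorem pv_main (length : Int) :
    generate_random_algo length = generate_random_algo_alt length := by
  rw [generate_random_algo, generate_random_algo_alt]
  simp only [PySem.List.pyRange_one, List.foldl_map, List.map_map]
  show String.ofList
      ((List.range (length - 0).toNat).foldl
        (fun (st : Int × List Char) (_ : Nat) =>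
          (random_character st.1, st.2 ++ [pvCh (random_character st.1)]))
        ((12568 : Int), ([] : List Char))).2
    = String.ofList (PySem.Chars.join []
        ((List.range (length - 0).toNat).map
          (fun (k : Nat) => [pvCh (pvStateB (0 + (k : Int) + 1))])))
  rw [pvFoldA]
  refine congrArg String.ofList ?_
  have hmap : (fun (k : Nat) => [pvCh (pvStateB (0 + (k : Int) + 1))])
      = fun (k : Nat) => [pvCh (pvIter (k + 1))] := by
    funext k
    have h : (0 + (k : Int) + 1) = ((k + 1 : Nat) : Int) := by push_cast; ring
    rw [h, pvState_eq_iter]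
  rw [hmap]
  have hsing : (List.range (length - 0).toNat).map (fun k => [pvCh (pvIter (k + 1))])
      = ((List.range (length - 0).toNat).map (fun k => pvCh (pvIter (k + 1)))).map ([·]) := by
    rw [List.map_map]; rfl
  rw [hsing, PySem.Chars.join_nil_singletons]

-- ===== VERDICT (by name: the statement is the Claim_ definition above) =====
theorem generate_random_algo_spec : Claim_equal_generate_random_algo := by
  intro length _
  unfold Spec_generate_random_algo
  exact pv_main length
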